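-- pv_equiv track=rewrite | github.com/JacksonYassin/automated-ttb-Review | parsing.py | contains_all_words
-- ===== SOURCE A (Python) =====
-- def contains_all_words(required:list, available:list):
--     """
--     Checks if all required words can be found in available words
--     Handles duplicates by counting occurances
--     Unlike other regex checks I use, these must be exact (case sensitive, punctuation, etc)
--     """
--
--     required_counts = {}
--     for word in required:
--         required_counts[word] = required_counts.get(word, 0) + 1
--
--     available_counts = {}
--     for word in available:
--         available_counts[word] = available_counts.get(word, 0) + 1
--
--     for word, count in required_counts.items():
--         if available_counts.get(word, 0) < count:
--             return False
--
--     return True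
-- ===== SOURCE B (Python) =====
-- def contains_all_words(required: list, available: list):
--     """
--     Checks if all required words can be found in available words,
--     with multiplicity, by a sorted two-pointer merge walk.
--     """
--     req = sorted(required)
--     av = sorted(available)
--     i = 0
--     for word in req:
--         while i < len(av) and av[i] < word:
--             i += 1
--         if i == len(av) or av[i] != word:
--             return False
--         i += 1
--     return True
-- ===== Notes on version B (the rewrite author's own statement) =====
-- stated objective: alternative
-- what changed: Replaced hash-counting (two dicts plus a per-key comparison loop) by sorting both lists once and walking them with a two-pointer merge that matches each required word against the available stream, so no counts are ever built.
import Mathlib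
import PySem

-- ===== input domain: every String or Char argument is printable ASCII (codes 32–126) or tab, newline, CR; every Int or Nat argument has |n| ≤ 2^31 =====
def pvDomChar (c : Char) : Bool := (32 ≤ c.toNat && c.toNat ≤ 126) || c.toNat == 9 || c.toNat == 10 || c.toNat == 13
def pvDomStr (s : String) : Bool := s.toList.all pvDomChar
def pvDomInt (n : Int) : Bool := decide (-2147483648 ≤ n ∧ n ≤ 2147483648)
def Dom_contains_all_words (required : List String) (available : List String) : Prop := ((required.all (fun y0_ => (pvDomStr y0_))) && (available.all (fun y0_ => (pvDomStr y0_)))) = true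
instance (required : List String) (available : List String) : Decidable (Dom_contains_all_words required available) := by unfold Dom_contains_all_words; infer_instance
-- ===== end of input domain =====

-- B drops A's hash-counting entirely: it sorts both lists and matches the required
-- words against the available ones with a two-pointer merge walk (alternative algorithm).

-- ===== PORT A =====
-- the 'for word, count in required_counts.items(): if …: return False' loop
def pvLoopA (ac : PySem.Dict String Int) : List (String × Int) → Bool
  | [] => true
  | (w, c) :: rest => if ac.getD w 0 < c then false else pvLoopA ac rest

def contains_all_words (required : List String) (available : List String) : Bool :=
  let required_counts := required.foldl (fun d w => d.insert w (d.getD w 0 + 1)) PySem.Dict.empty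
  let available_counts := available.foldl (fun d w => d.insert w (d.getD w 0 + 1)) PySem.Dict.empty
  pvLoopA available_counts required_counts.items

-- ===== PORT B =====
-- the 'for word in req: while i < len(av) and av[i] < word: i += 1; …' two-pointer walk,
-- written as the structural recursion over the two sorted lists
def pvMerge : List String → List String → Bool
  | [], _ => true
  | _ :: _, [] => false
  | w :: rs, a :: as_ =>
      if a < w then pvMerge (w :: rs) as_
      else if a == w then pvMerge rs as_
      else false

def contains_all_words_alt (required : List String) (available : List String) : Bool :=
  pvMerge (PySem.List.sorted required (fun x => x) false) (PySem.List.sorted available (fun x => x) false)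

-- ===== PRECONDITION & SPEC =====
def Spec_contains_all_words (required : List String) (available : List String) (out : Bool) : Prop := out = contains_all_words_alt required available
instance (required : List String) (available : List String) (out : Bool) : Decidable (Spec_contains_all_words required available out) := by unfold Spec_contains_all_words; infer_instance

-- ===== CLAIM (what is proved, stated in full; the proofs are below) =====
def Claim_equal_contains_all_words : Prop := ∀ (required : List String) (available : List String), Dom_contains_all_words required available → Spec_contains_all_words required available (contains_all_words required available)

-- ===== LEMMAS AND PROOFS =====
theorem pvLoopA_eq_all (ac : PySem.Dict String Int) (l : List (String × Int)) :
    pvLoopA ac l = l.all (fun p => decide (p.2 ≤ ac.getD p.1 0)) := by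
  induction l with
  | nil => rfl
  | cons p rest ih =>
    obtain ⟨w, c⟩ := p
    simp only [pvLoopA, List.all_cons, ih]
    by_cases h : ac.getD w 0 < c
    · simp [h, not_le.mpr h]
    · simp [h, not_lt.mp h]

-- A returns true iff every word's multiplicity in `available` covers its multiplicity in `required`
theorem contA_iff (required available : List String) :
    contains_all_words required available = true ↔
      ∀ w : String, required.count w ≤ available.count w := by
  unfold contains_all_words
  simp only [PySem.Dict.foldl_insert_getD_add_one_eq_counter, PySem.Dict.items_counter,
    pvLoopA_eq_all, List.all_map, List.all_eq_true]
  simp only [PySem.Dict.getD_counter]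
  constructor
  · intro h w
    by_cases hw : w ∈ required
    · have := h w (by simpa [PySem.Set.mem_ofList] using hw)
      exact_mod_cast by simpa using this
    · simp [List.count_eq_zero_of_not_mem hw]
  · intro h w _
    simpa using Int.ofNat_le.mpr (h w)

-- the merge walk on two ≤-sorted lists decides multiset inclusion
theorem pvMerge_iff (A : List String) : ∀ (R : List String),
    R.Pairwise (· ≤ ·) → A.Pairwise (· ≤ ·) →
    (pvMerge R A = true ↔ (↑R : Multiset String) ≤ (↑A : Multiset String)) := by
  induction A with
  | nil =>
    intro R _ _
    cases R with
    | nil => simp [pvMerge]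
    | cons w rs => simp [pvMerge]
  | cons a as_ ih =>
    intro R hR hA
    cases R with
    | nil => simp [pvMerge]
    | cons w rs =>
      have hA' : as_.Pairwise (· ≤ ·) := hA.tail
      by_cases h1 : a < w
      · -- skip a: a occurs nowhere in w :: rs
        obtain ⟨hRhd, hRtl⟩ := List.pairwise_cons.mp hR
        have hcnt : (w :: rs).count a = 0 := by
          refine List.count_eq_zero.mpr ?_
          intro hmem
          rcases List.mem_cons.mp hmem with h | h
          · exact absurd h (ne_of_lt h1)
          · exact absurd (hRhd _ h) (not_le.mpr h1)
        have step : ((↑(w :: rs) : Multiset String) ≤ ↑(a :: as_)) ↔ ((↑(w :: rs) : Multiset String) ≤ ↑as_) := by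
          constructor
          · intro hle
            rw [Multiset.le_iff_count] at hle ⊢
            intro x
            by_cases hx : x = a
            · subst hx
              simp [Multiset.coe_count, hcnt]
            · have hax : a ≠ x := fun h => hx h.symm
              have := hle x
              simpa [Multiset.coe_count, List.count_cons, hax] using this
          · intro hle
            calc (↑(w :: rs) : Multiset String) ≤ ↑as_ := hle
              _ ≤ ↑(a :: as_) := by
                  have : (↑(a :: as_) : Multiset String) = a ::ₘ ↑as_ := rfl
                  rw [this]; exact Multiset.le_cons_self _ _
        rw [show pvMerge (w :: rs) (a :: as_) = pvMerge (w :: rs) as_ by simp [pvMerge, h1]]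
        rw [ih (w :: rs) hR hA', step]
      · by_cases h2 : a = w
        · subst h2
          rw [show pvMerge (a :: rs) (a :: as_) = pvMerge rs as_ by simp [pvMerge]]
          rw [ih rs hR.tail hA']
          have : (↑(a :: rs) : Multiset String) = a ::ₘ ↑rs := rfl
          have that : (↑(a :: as_) : Multiset String) = a ::ₘ ↑as_ := rfl
          rw [this, that, Multiset.cons_le_cons_iff]
        · -- w < a: w occurs in R but nowhere in a :: as_
          have hwa : w < a := lt_of_le_of_ne (not_lt.mp h1) (Ne.symm h2)
          obtain ⟨hAhd, hAtl⟩ := List.pairwise_cons.mp hA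
          have hcnt : (a :: as_).count w = 0 := by
            refine List.count_eq_zero.mpr ?_
            intro hmem
            rcases List.mem_cons.mp hmem with h | h
            · exact absurd h (ne_of_lt hwa)
            · exact absurd (hAhd _ h) (not_le.mpr hwa)
          rw [show pvMerge (w :: rs) (a :: as_) = false by simp [pvMerge, h1, h2]]
          simp only [Bool.false_eq_true, false_iff]
          intro hle
          have := Multiset.le_iff_count.mp hle w
          rw [Multiset.coe_count, Multiset.coe_count, hcnt, List.count_cons_self] at this
          omega

-- ===== VERDICT (by name: the statement is the Claim_ definition above) =====
theorem contains_all_words_spec : Claim_equal_contains_all_words := by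
  intro required available _
  unfold Spec_contains_all_words contains_all_words_alt
  have hperm_r : (PySem.List.sorted required (fun x => x) false).Perm required :=
    PySem.List.sorted_perm _ _ _
  have hperm_a : (PySem.List.sorted available (fun x => x) false).Perm available :=
    PySem.List.sorted_perm _ _ _
  rw [Bool.eq_iff_iff, contA_iff]
  rw [pvMerge_iff _ _ (by simpa using PySem.List.sorted_pairwise required (fun x => x))
      (by simpa using PySem.List.sorted_pairwise available (fun x => x))]
  rw [Multiset.le_iff_count]
  constructor
  · intro h x
    simpa [Multiset.coe_count, hperm_r.count_eq, hperm_a.count_eq] using h x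
  · intro h x
    have := h x
    simpa [Multiset.coe_count, hperm_r.count_eq, hperm_a.count_eq] using this
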